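-- pv_equiv track=rewrite | github.com/Jachm11/achavarria_computer_architecture_1_2022 | proyecto_2/program/initial_data_to_bin.py | word_to_byte_list
-- ===== SOURCE A (Python) =====
-- def word_to_byte_list(w):
--     w = w[::-1]
--     res = []
--     x=0
--     byteStr=''
--     for h in w:
--         byteStr=h+byteStr
--         x+=1
--         if(x>=2):
--             res.append(byteStr)
--             byteStr=''
--             x=0
--     return res
-- ===== SOURCE B (Python) =====
-- def word_to_byte_list(w):
--     return [w[i - 1:i + 1] for i in range(len(w) - 1, 0, -2)]
-- ===== Notes on version B (the rewrite author's own statement) =====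
-- stated objective: simpler
-- what changed: Replaces A's reverse-the-string-then-accumulate state machine (counter x and character-prepend byteStr) by a one-line comprehension that slices each forward-order 2-char chunk directly at descending start positions range(len(w)-1, 0, -2), which drops a leading odd character automatically.
import Mathlib
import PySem

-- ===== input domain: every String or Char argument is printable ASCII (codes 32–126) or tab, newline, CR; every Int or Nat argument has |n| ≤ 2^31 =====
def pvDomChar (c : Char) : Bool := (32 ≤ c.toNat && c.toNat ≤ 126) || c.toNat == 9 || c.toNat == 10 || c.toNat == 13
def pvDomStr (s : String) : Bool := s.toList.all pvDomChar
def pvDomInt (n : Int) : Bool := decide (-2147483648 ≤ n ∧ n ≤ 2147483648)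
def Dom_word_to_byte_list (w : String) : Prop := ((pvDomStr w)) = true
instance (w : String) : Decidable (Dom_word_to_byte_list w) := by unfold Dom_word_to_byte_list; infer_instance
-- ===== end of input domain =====

-- B replaces A's reversed-traversal character accumulator (counter + string prepend) by direct
-- slicing of forward-order 2-char chunks at descending start positions (objective: simpler).

-- ===== PORT A =====
-- A's for-loop over the reversed string, state (res, byteStr, x); strings are carried as
-- List Char (PySem.Chars convention) and turned into String with String.ofList on append,
-- which is exact for Python string concatenation h + byteStr.
def wordLoopA : List Char → List String → List Char → Int → List String
  | [], res, _, _ => res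
  | h :: t, res, byteStr, x =>
      let byteStr' := h :: byteStr        -- byteStr = h + byteStr
      let x' := x + 1
      if x' ≥ 2 then wordLoopA t (res ++ [String.ofList byteStr']) [] 0
      else wordLoopA t res byteStr' x'

def word_to_byte_list (w : String) : List String :=
  -- w = w[::-1] : exact per PySem.Str.slice?_none_none_neg_one (step -1 never raises)
  let rev := String.ofList w.toList.reverse
  wordLoopA rev.toList [] [] 0

-- ===== PORT B =====
def word_to_byte_list_alt (w : String) : List String :=
  (PySem.List.pyRange ((w.toList.length : Int) - 1) 0 (-2)).map
    (fun i => String.ofList (PySem.List.slice w.toList (some (i - 1)) (some (i + 1))))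

-- ===== PRECONDITION & SPEC =====
def Spec_word_to_byte_list (w : String) (out : List String) : Prop := out = word_to_byte_list_alt w
instance (w : String) (out : List String) : Decidable (Spec_word_to_byte_list w out) := by unfold Spec_word_to_byte_list; infer_instance

-- ===== CLAIM (what is proved, stated in full; the proofs are below) =====
def Claim_equal_word_to_byte_list : Prop := ∀ (w : String), Dom_word_to_byte_list w → Spec_word_to_byte_list w (word_to_byte_list w)

-- ===== LEMMAS AND PROOFS =====

-- B's body on the list side, for a given character list
def coreB (cs : List Char) : List String :=
  (PySem.List.pyRange ((cs.length : Int) - 1) 0 (-2)).map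
    (fun i => String.ofList (PySem.List.slice cs (some (i - 1)) (some (i + 1))))

-- A's loop only appends to res
lemma wordLoopA_acc (t : List Char) (res : List String) (b : List Char) (x : Int) :
    wordLoopA t res b x = res ++ wordLoopA t [] b x := by
  induction t generalizing res b x with
  | nil => simp [wordLoopA]
  | cons h t ih =>
    simp only [wordLoopA]
    split_ifs with hx
    · rw [ih (res ++ [String.ofList (h :: b)]), ih ([] ++ [String.ofList (h :: b)])]
      simp
    · exact ih res (h :: b) (x + 1)

-- unfolding step for range(a, 0, -2) with a > 0
lemma pyRange_neg_two_cons (a : Int) (ha : 0 < a) :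
    PySem.List.pyRange a 0 (-2) = a :: PySem.List.pyRange (a - 2) 0 (-2) := by
  simp only [PySem.List.pyRange]
  norm_num
  have h1 : ((a + 1) / 2).toNat = ((a - 2 + 1) / 2).toNat + 1 := by omega
  split_ifs with h2
  · have h1' : ((a + 2 - 1) / 2).toNat = ((a - 1) / 2).toNat + 1 := by omega
    rw [h1', List.range_succ_eq_map]
    simp only [List.map_cons, List.map_map]
    congr 1
    · push_cast; ring
    apply List.map_congr_left; intro k _; simp [Function.comp]; ring
  · -- a - 2 ≤ 0 : tail range is empty, head range has one element
    have h1' : ((a + 2 - 1) / 2).toNat = 1 := by omega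
    simp [h1', List.range_succ]

lemma mem_pyRange_neg_two (a i : Int) (h : i ∈ PySem.List.pyRange a 0 (-2)) :
    0 < i ∧ i ≤ a := by
  simp only [PySem.List.pyRange] at h
  norm_num at h
  by_cases h2 : 0 < a
  · simp only [h2, if_pos] at h
    obtain ⟨k, hk, rfl⟩ := h
    omega
  · rw [if_neg h2] at h
    simp at h

-- a 2-char slice lying entirely inside the prefix ignores the appended tail
lemma slice_prefix (l ext : List Char) (i : Int) (h0 : 0 < i) (h1 : i + 1 ≤ (l.length : Int)) :
    PySem.List.slice (l ++ ext) (some (i - 1)) (some (i + 1)) =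
    PySem.List.slice l (some (i - 1)) (some (i + 1)) := by
  rw [PySem.List.slice_toNat _ (by omega) (by omega), PySem.List.slice_toNat _ (by omega) (by omega)]
  rw [List.drop_append_of_le_length (by omega)]
  rw [List.take_append_of_le_length (by simp [List.length_drop]; omega)]

lemma coreB_snoc2 (t : List Char) (a b : Char) :
    coreB (t ++ [a, b]) = String.ofList [a, b] :: coreB t := by
  unfold coreB
  have hlen : ((t ++ [a, b]).length : Int) - 1 = (t.length : Int) + 1 := by
    simp; omega
  rw [hlen, pyRange_neg_two_cons _ (by omega)]
  simp only [List.map_cons]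
  congr 1
  · -- head chunk: slice (t ++ [a,b]) [t.length : t.length + 2] = [a, b]
    have : ((t.length : Int) + 1 - 1) = ((t.length : Nat) : Int) := by omega
    rw [this]
    have h2 : ((t.length : Int) + 1 + 1) = (((t.length + 2 : Nat)) : Int) := by push_cast; omega
    rw [h2, PySem.List.slice_natCast]
    simp
  · have : (t.length : Int) + 1 - 2 = (t.length : Int) - 1 := by omega
    rw [this]
    apply List.map_congr_left
    intro i hi
    obtain ⟨hi0, hi1⟩ := mem_pyRange_neg_two _ _ hi
    rw [slice_prefix t [a, b] i hi0 (by omega)]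

-- main equation: A's loop on the reversed list computes B's chunks of the original list
lemma loop_eq_coreB : ∀ n (r : List Char), r.length ≤ n →
    wordLoopA r [] [] 0 = coreB r.reverse := by
  intro n
  induction n with
  | zero =>
    intro r hr
    have : r = [] := List.eq_nil_of_length_eq_zero (by omega)
    subst this
    simp [wordLoopA, coreB, PySem.List.pyRange]
  | succ n ih =>
    intro r hr
    match r with
    | [] => simp [wordLoopA, coreB, PySem.List.pyRange]
    | [h] =>
      simp only [wordLoopA]
      norm_num
      simp [coreB, PySem.List.pyRange]
    | b :: a :: t =>
      simp only [wordLoopA]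
      norm_num
      rw [wordLoopA_acc]
      rw [ih t (by simp at hr; omega)]
      rw [coreB_snoc2]
      simp

-- ===== VERDICT (by name: the statement is the Claim_ definition above) =====
theorem word_to_byte_list_spec : Claim_equal_word_to_byte_list := by
  intro w _
  unfold Spec_word_to_byte_list word_to_byte_list word_to_byte_list_alt
  have h := loop_eq_coreB (w.toList.reverse.length) ((String.ofList w.toList.reverse).toList)
    (by simp)
  rw [h]
  simp [coreB]
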